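-- pv_equiv track=rewrite | github.com/sjogleka/General_codes | sprintTraining.py | getMostVisited
-- ===== SOURCE A (Python) =====
-- def getMostVisited(n,sprints):
--     d = {}
--     minvalue = float('inf')
--     for i in range(len(sprints)-1):
--         if sprints[i+1]<sprints[i]:
--             flag,final = True,sprints[i + 1] - 1
--         else:
--             flag,final = False,sprints[i + 1] + 1
--         j = sprints[i]
--         while j!=final:
--             if j not in d:
--                 d[j] = 0
--             d[j] += 1
--             if flag:j-=1
--             else:j+=1
--
--     maxVal = max(d.items(), key=lambda x: x[1])
--
--     for k,v in d.items():
--         if v == maxVal[1] and k<minvalue: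
--             minvalue = k
--     return minvalue
-- ===== SOURCE B (Python) =====
-- def getMostVisited(n, sprints):
--     # Count visits per candidate point instead of walking every unit step:
--     # normalize each leg to an inclusive interval; the smallest argmax is always
--     # some interval's lower endpoint, so only those candidates are scanned.
--     segs = [(a, b) if a <= b else (b, a) for a, b in zip(sprints, sprints[1:])]
--     best, best_cnt = None, 0
--     for lo in sorted({l for l, _ in segs}):
--         c = sum(1 for l, h in segs if l <= lo <= h)
--         if c > best_cnt:
--             best, best_cnt = lo, c
--     return best
-- ===== Notes on version B (the rewrite author's own statement) =====
-- stated objective: faster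
-- what changed: A walks every unit step of every leg and counts each visited point in a dict; B normalizes each leg to an inclusive interval and evaluates the coverage count only at the distinct lower endpoints (the smallest argmax is always a lower endpoint), so cost no longer depends on the coordinate span of the legs.
import Mathlib
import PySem

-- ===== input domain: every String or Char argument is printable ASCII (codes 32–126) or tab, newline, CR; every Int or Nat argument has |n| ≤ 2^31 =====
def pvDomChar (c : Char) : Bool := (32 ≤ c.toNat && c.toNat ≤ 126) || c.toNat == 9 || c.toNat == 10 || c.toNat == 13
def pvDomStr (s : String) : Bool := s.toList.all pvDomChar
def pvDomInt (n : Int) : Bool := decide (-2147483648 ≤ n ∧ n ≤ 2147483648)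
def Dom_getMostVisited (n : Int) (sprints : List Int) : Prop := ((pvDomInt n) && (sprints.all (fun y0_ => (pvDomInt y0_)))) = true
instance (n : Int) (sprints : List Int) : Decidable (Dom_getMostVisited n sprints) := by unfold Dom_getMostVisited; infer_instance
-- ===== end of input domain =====

-- B replaces A's unit-step walk over every leg by evaluating the coverage count
-- only at the distinct lower endpoints of the legs (the smallest argmax is always one).

-- ===== PORT A =====
-- A's dict, represented for evaluation speed as a hash map of counts plus the list of
-- keys in reverse insertion order (reversed when items() is read): the same dict state.
def walkA : Nat → Int → Int → Bool → Std.HashMap Int Int → List Int →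
    Std.HashMap Int Int × List Int
  | 0, _, _, _, d, ks => (d, ks)
  | fuel + 1, j, final, flag, d, ks =>
    if j = final then (d, ks)
    else
      -- 'if j not in d: d[j] = 0'
      let dk1 := if d.contains j then (d, ks) else (d.insert j 0, j :: ks)
      -- 'd[j] += 1'
      let d2 := dk1.1.insert j (dk1.1.getD j 0 + 1)
      walkA fuel (if flag then j - 1 else j + 1) final flag d2 dk1.2

def getMostVisited (n : Int) (sprints : List Int) : Int :=
  let dk := (PySem.List.pyRange 0 (PySem.List.len sprints - 1) 1).foldl
    (fun dk i =>
      let si := PySem.List.pyGetD sprints i 0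
      let si1 := PySem.List.pyGetD sprints (i + 1) 0
      let ff : Bool × Int := if si1 < si then (true, si1 - 1) else (false, si1 + 1)
      walkA (ff.2 - si).natAbs si ff.2 ff.1 dk.1 dk.2)
    ((∅ : Std.HashMap Int Int), ([] : List Int))
  let items := dk.2.reverse.map (fun k => (k, dk.1.getD k 0))
  let maxVal := (PySem.List.max? items (fun x => x.2)).getD (0, 0)
  let minvalue := items.foldl
    (fun (mv : Option Int) kv =>
      if kv.2 == maxVal.2 && mv.all (fun m => kv.1 < m) then some kv.1 else mv)
    (none : Option Int)
  minvalue.getD 0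

-- ===== PORT B =====
def getMostVisited_alt (n : Int) (sprints : List Int) : Int :=
  let segs := (List.zip sprints (PySem.List.slice sprints (some 1) none)).map
    (fun p => if p.1 ≤ p.2 then (p.1, p.2) else (p.2, p.1))
  let los := PySem.List.sorted (PySem.Set.ofList (segs.map (fun s => s.1))) (fun x => x) false
  let r := los.foldl
    (fun (best : Option Int × Int) lo =>
      let c : Int := segs.countP (fun s => decide (s.1 ≤ lo ∧ lo ≤ s.2))
      if best.2 < c then (some lo, c) else best)
    ((none : Option Int), (0 : Int))
  -- best is 'None' only when there is no leg at all — excluded by Pre_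
  r.1.getD 0

-- ===== PRECONDITION & SPEC =====
-- Pre_ excludes sprints of length < 2: there A's dict stays empty and max() raises ValueError.
def Pre_getMostVisited (n : Int) (sprints : List Int) : Prop := 2 ≤ sprints.length
instance (n : Int) (sprints : List Int) : Decidable (Pre_getMostVisited n sprints) := by
  unfold Pre_getMostVisited; infer_instance

def pvWitness_getMostVisited : Int × List Int := (4, [1, 3, 2])

def Spec_getMostVisited (n : Int) (sprints : List Int) (out : Int) : Prop := out = getMostVisited_alt n sprints
instance (n : Int) (sprints : List Int) (out : Int) : Decidable (Spec_getMostVisited n sprints out) := by unfold Spec_getMostVisited; infer_instance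

-- ===== CLAIM (what is proved, stated in full; the proofs are below) =====
def Claim_equal_getMostVisited : Prop := ∀ (n : Int) (sprints : List Int), Dom_getMostVisited n sprints → Pre_getMostVisited n sprints → Spec_getMostVisited n sprints (getMostVisited n sprints)

-- ===== LEMMAS AND PROOFS =====

-- the list of legs as raw (from, to) pairs, and the coverage count of a point
def legs (s : List Int) : List (Int × Int) := List.zip s s.tail

def cnt (s : List Int) (p : Int) : Nat :=
  (legs s).countP (fun pr => decide (min pr.1 pr.2 ≤ p ∧ p ≤ max pr.1 pr.2))

-- a point is a lower endpoint of some leg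
def IsLo (s : List Int) (p : Int) : Prop := ∃ pr ∈ legs s, min pr.1 pr.2 = p

-- the common characterisation: r is the smallest visited point of maximal coverage
def IsBest (s : List Int) (r : Int) : Prop :=
  1 ≤ cnt s r ∧ (∀ q, 1 ≤ cnt s q → cnt s q ≤ cnt s r) ∧
    (∀ q, 1 ≤ cnt s q → cnt s q = cnt s r → r ≤ q)

theorem best_unique {s : List Int} {r1 r2 : Int} (h1 : IsBest s r1) (h2 : IsBest s r2) :
    r1 = r2 := by
  obtain ⟨m1, mx1, mn1⟩ := h1
  obtain ⟨m2, mx2, mn2⟩ := h2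
  have e : cnt s r1 = cnt s r2 := le_antisymm (mx2 r1 m1) (mx1 r2 m2)
  have a := mn1 r2 m2 e.symm
  have b := mn2 r1 m1 e
  omega

-- ---- A-side: the walk builds exactly the coverage counts ----

def stepA (dk : Std.HashMap Int Int × List Int) (a b : Int) :
    Std.HashMap Int Int × List Int :=
  let ff : Bool × Int := if b < a then (true, b - 1) else (false, b + 1)
  walkA (ff.2 - a).natAbs a ff.2 ff.1 dk.1 dk.2

-- the key list tracks exactly the hash map's keys
def DInv (d : Std.HashMap Int Int) (ks : List Int) : Prop :=
  ∀ q : Int, d.contains q = true ↔ q ∈ ks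

theorem d2_getD (d : Std.HashMap Int Int) (ks : List Int) (j p : Int) :
    ((if d.contains j then (d, ks) else (d.insert j 0, j :: ks)).1.insert j
      ((if d.contains j then (d, ks) else (d.insert j 0, j :: ks)).1.getD j 0 + 1)).getD p 0
      = d.getD p 0 + (if p = j then 1 else 0) := by
  by_cases hc : d.contains j
  · rw [if_pos hc]
    simp only [Std.HashMap.getD_insert, beq_iff_eq]
    split_ifs with h1 h2 h3
    · subst h1; omega
    · exact absurd h1.symm h2
    · exact absurd h3.symm h1
    · omega
  · rw [if_neg hc]
    have h0 : d.getD j 0 = 0 :=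
      Std.HashMap.getD_eq_fallback_of_contains_eq_false (by simpa using hc)
    simp only [Std.HashMap.getD_insert, beq_iff_eq, if_true]
    split_ifs with h1 h2 h3
    · subst h1; omega
    · exact absurd h1.symm h2
    · exact absurd h3.symm h1
    · omega

theorem d2_contains (d : Std.HashMap Int Int) (ks : List Int) (j q : Int) :
    ((if d.contains j then (d, ks) else (d.insert j 0, j :: ks)).1.insert j
      ((if d.contains j then (d, ks) else (d.insert j 0, j :: ks)).1.getD j 0 + 1)).contains q
      = (d.contains q || decide (q = j)) := by
  by_cases hc : d.contains j
  · rw [if_pos hc]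
    by_cases hq : q = j
    · subst hq; simp [Std.HashMap.contains_insert, hc]
    · simp [Std.HashMap.contains_insert, hq, Ne.symm hq]
  · rw [if_neg hc]
    by_cases hq : q = j
    · subst hq; simp [Std.HashMap.contains_insert]
    · simp [Std.HashMap.contains_insert, hq, Ne.symm hq]

theorem d2_inv (d : Std.HashMap Int Int) (ks : List Int) (j : Int) (h : DInv d ks) :
    DInv ((if d.contains j then (d, ks) else (d.insert j 0, j :: ks)).1.insert j
        ((if d.contains j then (d, ks) else (d.insert j 0, j :: ks)).1.getD j 0 + 1))
      (if d.contains j then (d, ks) else (d.insert j 0, j :: ks)).2 := by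
  intro q
  rw [d2_contains d ks j q]
  by_cases hc : d.contains j
  · simp only [if_pos hc]
    constructor
    · intro hb
      rcases Bool.or_eq_true_iff.mp hb with hb | hb
      · exact (h q).mp hb
      · have : q = j := of_decide_eq_true hb
        exact this ▸ (h j).mp hc
    · intro hm
      exact Bool.or_eq_true_iff.mpr (Or.inl ((h q).mpr hm))
  · simp only [if_neg hc, List.mem_cons]
    constructor
    · intro hb
      rcases Bool.or_eq_true_iff.mp hb with hb | hb
      · exact Or.inr ((h q).mp hb)
      · exact Or.inl (of_decide_eq_true hb)
    · rintro (rfl | hm)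
      · exact Bool.or_eq_true_iff.mpr (Or.inr (by simp))
      · exact Bool.or_eq_true_iff.mpr (Or.inl ((h q).mpr hm))

theorem d2_nodup (d : Std.HashMap Int Int) (ks : List Int) (j : Int) (h : DInv d ks)
    (hnd : ks.Nodup) :
    ((if d.contains j then (d, ks) else (d.insert j 0, j :: ks)).2).Nodup := by
  by_cases hc : d.contains j
  · simpa [hc] using hnd
  · simp only [if_neg hc]
    refine List.nodup_cons.mpr ⟨?_, hnd⟩
    intro hj
    exact hc ((h j).mpr hj)

theorem walk_up_getD : ∀ (k : Nat) (j : Int) (d : Std.HashMap Int Int) (ks : List Int) (p : Int),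
    (walkA k j (j + (k : Int)) false d ks).1.getD p 0
      = d.getD p 0 + (if j ≤ p ∧ p < j + (k : Int) then 1 else 0) := by
  intro k
  induction k with
  | zero =>
    intro j d ks p
    rw [show walkA 0 j (j + ((0 : Nat) : Int)) false d ks = (d, ks) from rfl,
      if_neg (show ¬ (j ≤ p ∧ p < j + ((0 : Nat) : Int)) by omega)]
    change d.getD p 0 = d.getD p 0 + 0
    omega
  | succ k ih =>
    intro j d ks p
    have harg : j + (((k : Nat) + 1 : Nat) : Int) = (j + 1) + (k : Int) := by push_cast; ring
    simp only [walkA, harg, Bool.false_eq_true, if_false]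
    rw [if_neg (show ¬ j = j + 1 + (k : Int) by omega)]
    rw [ih (j + 1) _ _ p, d2_getD d ks j p]
    split_ifs <;> omega

theorem walk_down_getD : ∀ (k : Nat) (j : Int) (d : Std.HashMap Int Int) (ks : List Int) (p : Int),
    (walkA k j (j - (k : Int)) true d ks).1.getD p 0
      = d.getD p 0 + (if j - (k : Int) < p ∧ p ≤ j then 1 else 0) := by
  intro k
  induction k with
  | zero =>
    intro j d ks p
    rw [show walkA 0 j (j - ((0 : Nat) : Int)) true d ks = (d, ks) from rfl,
      if_neg (show ¬ (j - ((0 : Nat) : Int) < p ∧ p ≤ j) by omega)]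
    change d.getD p 0 = d.getD p 0 + 0
    omega
  | succ k ih =>
    intro j d ks p
    have harg : j - (((k : Nat) + 1 : Nat) : Int) = (j - 1) - (k : Int) := by push_cast; ring
    simp only [walkA, harg, if_true]
    rw [if_neg (show ¬ j = j - 1 - (k : Int) by omega)]
    rw [ih (j - 1) _ _ p, d2_getD d ks j p]
    split_ifs <;> omega

theorem walk_up_contains : ∀ (k : Nat) (j : Int) (d : Std.HashMap Int Int) (ks : List Int) (q : Int),
    (walkA k j (j + (k : Int)) false d ks).1.contains q
      = (d.contains q || decide (j ≤ q ∧ q < j + (k : Int))) := by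
  intro k
  induction k with
  | zero =>
    intro j d ks q
    rw [show walkA 0 j (j + ((0 : Nat) : Int)) false d ks = (d, ks) from rfl,
      decide_eq_false (show ¬ (j ≤ q ∧ q < j + ((0 : Nat) : Int)) by omega)]
    simp
  | succ k ih =>
    intro j d ks q
    have harg : j + (((k : Nat) + 1 : Nat) : Int) = (j + 1) + (k : Int) := by push_cast; ring
    simp only [walkA, harg, Bool.false_eq_true, if_false]
    rw [if_neg (show ¬ j = j + 1 + (k : Int) by omega)]
    rw [ih (j + 1) _ _ q, d2_contains d ks j q]
    by_cases h1 : q = j <;> by_cases h2 : j + 1 ≤ q ∧ q < j + 1 + (k : Int) <;>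
      by_cases h3 : j ≤ q ∧ q < j + 1 + (k : Int) <;>
      simp [h1, h2, h3] <;> omega

theorem walk_down_contains : ∀ (k : Nat) (j : Int) (d : Std.HashMap Int Int) (ks : List Int) (q : Int),
    (walkA k j (j - (k : Int)) true d ks).1.contains q
      = (d.contains q || decide (j - (k : Int) < q ∧ q ≤ j)) := by
  intro k
  induction k with
  | zero =>
    intro j d ks q
    rw [show walkA 0 j (j - ((0 : Nat) : Int)) true d ks = (d, ks) from rfl,
      decide_eq_false (show ¬ (j - ((0 : Nat) : Int) < q ∧ q ≤ j) by omega)]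
    simp
  | succ k ih =>
    intro j d ks q
    have harg : j - (((k : Nat) + 1 : Nat) : Int) = (j - 1) - (k : Int) := by push_cast; ring
    simp only [walkA, harg, if_true]
    rw [if_neg (show ¬ j = j - 1 - (k : Int) by omega)]
    rw [ih (j - 1) _ _ q, d2_contains d ks j q]
    by_cases h1 : q = j <;> by_cases h2 : j - 1 - (k : Int) < q ∧ q ≤ j - 1 <;>
      by_cases h3 : j - 1 - (k : Int) < q ∧ q ≤ j <;>
      simp [h1, h2, h3] <;> omega

theorem walk_invariant : ∀ (k : Nat) (j final : Int) (flag : Bool)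
    (d : Std.HashMap Int Int) (ks : List Int),
    DInv d ks → ks.Nodup →
      DInv (walkA k j final flag d ks).1 (walkA k j final flag d ks).2 ∧
        (walkA k j final flag d ks).2.Nodup := by
  intro k
  induction k with
  | zero => intro j final flag d ks h hnd; exact ⟨h, hnd⟩
  | succ k ih =>
    intro j final flag d ks h hnd
    by_cases hje : j = final
    · simp only [walkA, if_pos hje]; exact ⟨h, hnd⟩
    · simp only [walkA, if_neg hje]
      exact ih _ final flag _ _ (d2_inv d ks j h) (d2_nodup d ks j h hnd)

theorem stepA_getD (dk : Std.HashMap Int Int × List Int) (a b p : Int) :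
    (stepA dk a b).1.getD p 0
      = dk.1.getD p 0 + (if min a b ≤ p ∧ p ≤ max a b then 1 else 0) := by
  by_cases hba : b < a
  · simp only [stepA, if_pos hba]
    set k := (b - 1 - a).natAbs with hkdef
    have harg : b - 1 = a - (k : Int) := by omega
    rw [harg, walk_down_getD k a dk.1 dk.2 p,
      min_eq_right (le_of_lt hba), max_eq_left (le_of_lt hba)]
    split_ifs <;> omega
  · simp only [stepA, if_neg hba]
    set k := (b + 1 - a).natAbs with hkdef
    have harg : b + 1 = a + (k : Int) := by omega
    rw [harg, walk_up_getD k a dk.1 dk.2 p,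
      min_eq_left (le_of_not_gt hba), max_eq_right (le_of_not_gt hba)]
    split_ifs <;> omega

theorem stepA_contains (dk : Std.HashMap Int Int × List Int) (a b q : Int) :
    (stepA dk a b).1.contains q
      = (dk.1.contains q || decide (min a b ≤ q ∧ q ≤ max a b)) := by
  by_cases hba : b < a
  · simp only [stepA, if_pos hba]
    set k := (b - 1 - a).natAbs with hkdef
    have harg : b - 1 = a - (k : Int) := by omega
    rw [harg, walk_down_contains k a dk.1 dk.2 q]
    congr 1
    rw [decide_eq_decide, min_eq_right (le_of_lt hba), max_eq_left (le_of_lt hba)]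
    omega
  · simp only [stepA, if_neg hba]
    set k := (b + 1 - a).natAbs with hkdef
    have harg : b + 1 = a + (k : Int) := by omega
    rw [harg, walk_up_contains k a dk.1 dk.2 q]
    congr 1
    rw [decide_eq_decide, min_eq_left (le_of_not_gt hba), max_eq_right (le_of_not_gt hba)]
    omega

theorem stepA_invariant (dk : Std.HashMap Int Int × List Int) (a b : Int)
    (h : DInv dk.1 dk.2) (hnd : dk.2.Nodup) :
    DInv (stepA dk a b).1 (stepA dk a b).2 ∧ (stepA dk a b).2.Nodup := by
  unfold stepA
  exact walk_invariant _ _ _ _ dk.1 dk.2 h hnd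

theorem foldA_getD : ∀ (zs : List (Int × Int)) (dk : Std.HashMap Int Int × List Int) (p : Int),
    (zs.foldl (fun dk pr => stepA dk pr.1 pr.2) dk).1.getD p 0
      = dk.1.getD p 0 + (zs.countP (fun pr => decide (min pr.1 pr.2 ≤ p ∧ p ≤ max pr.1 pr.2)) : Int) := by
  intro zs
  induction zs with
  | nil => intro dk p; simp
  | cons x t ih =>
    intro dk p
    simp only [List.foldl_cons, List.countP_cons]
    rw [ih, stepA_getD]
    by_cases hx : min x.1 x.2 ≤ p ∧ p ≤ max x.1 x.2 <;> simp [hx] <;> omega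

theorem foldA_contains : ∀ (zs : List (Int × Int)) (dk : Std.HashMap Int Int × List Int) (q : Int),
    (zs.foldl (fun dk pr => stepA dk pr.1 pr.2) dk).1.contains q
      = (dk.1.contains q || decide (0 < zs.countP (fun pr => decide (min pr.1 pr.2 ≤ q ∧ q ≤ max pr.1 pr.2)))) := by
  intro zs
  induction zs with
  | nil => intro dk q; simp
  | cons x t ih =>
    intro dk q
    simp only [List.foldl_cons, List.countP_cons]
    rw [ih, stepA_contains]
    by_cases h1 : min x.1 x.2 ≤ q ∧ q ≤ max x.1 x.2
    · rw [decide_eq_true h1]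
      have hp : (0 : Nat) < t.countP (fun pr => decide (min pr.1 pr.2 ≤ q ∧ q ≤ max pr.1 pr.2))
          + (if (true : Bool) = true then 1 else 0) := by simp
      rw [decide_eq_true hp]
      simp
    · rw [decide_eq_false h1]
      simp only [Bool.false_eq_true, if_false, Nat.add_zero, Bool.or_false]

theorem foldA_invariant : ∀ (zs : List (Int × Int)) (dk : Std.HashMap Int Int × List Int),
    DInv dk.1 dk.2 → dk.2.Nodup →
      DInv (zs.foldl (fun dk pr => stepA dk pr.1 pr.2) dk).1
          (zs.foldl (fun dk pr => stepA dk pr.1 pr.2) dk).2 ∧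
        (zs.foldl (fun dk pr => stepA dk pr.1 pr.2) dk).2.Nodup := by
  intro zs
  induction zs with
  | nil => intro dk h hnd; exact ⟨h, hnd⟩
  | cons x t ih =>
    intro dk h hnd
    obtain ⟨h', hnd'⟩ := stepA_invariant dk x.1 x.2 h hnd
    exact ih _ h' hnd'

def dictOf (s : List Int) : Std.HashMap Int Int × List Int :=
  (legs s).foldl (fun dk pr => stepA dk pr.1 pr.2) ((∅ : Std.HashMap Int Int), ([] : List Int))

theorem dictOf_getD (s : List Int) (p : Int) : (dictOf s).1.getD p 0 = (cnt s p : Int) := by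
  unfold dictOf cnt
  rw [foldA_getD]
  simp

theorem dictOf_contains (s : List Int) (q : Int) :
    (dictOf s).1.contains q = decide (1 ≤ cnt s q) := by
  unfold dictOf cnt
  rw [foldA_contains]
  simp [Nat.lt_iff_add_one_le]

theorem dictOf_invariant (s : List Int) :
    DInv (dictOf s).1 (dictOf s).2 ∧ (dictOf s).2.Nodup := by
  unfold dictOf
  exact foldA_invariant _ _ (fun q => by simp) List.nodup_nil

def itemsOf (s : List Int) : List (Int × Int) :=
  (dictOf s).2.reverse.map (fun k => (k, (dictOf s).1.getD k 0))

theorem memI (s : List Int) : ∀ kv : Int × Int, kv ∈ itemsOf s →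
    kv.2 = (cnt s kv.1 : Int) ∧ 1 ≤ cnt s kv.1 := by
  intro kv hkv
  obtain ⟨k, hk, rfl⟩ := List.mem_map.mp hkv
  have hks : k ∈ (dictOf s).2 := List.mem_reverse.mp hk
  have hcon : (dictOf s).1.contains k = true := ((dictOf_invariant s).1 k).mpr hks
  rw [dictOf_contains] at hcon
  exact ⟨by rw [dictOf_getD], of_decide_eq_true hcon⟩

theorem memI2 (s : List Int) : ∀ q : Int, 1 ≤ cnt s q → (q, (cnt s q : Int)) ∈ itemsOf s := by
  intro q hq
  have hcon : (dictOf s).1.contains q = true := by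
    rw [dictOf_contains]; exact decide_eq_true hq
  have hks : q ∈ (dictOf s).2 := ((dictOf_invariant s).1 q).mp hcon
  refine List.mem_map.mpr ⟨q, List.mem_reverse.mpr hks, ?_⟩
  rw [dictOf_getD]

theorem mapIdx_eq_zip (s : List Int) :
    (PySem.List.pyRange 0 (PySem.List.len s - 1) 1).map
      (fun i => (PySem.List.pyGetD s i 0, PySem.List.pyGetD s (i + 1) 0)) = legs s := by
  apply List.ext_getElem
  · simp only [List.length_map, PySem.List.length_pyRange_one, PySem.List.len_eq,
      legs, List.length_zip, List.length_tail]
    omega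
  · intro k h1 h2
    simp only [List.length_map, PySem.List.length_pyRange_one, PySem.List.len_eq] at h1
    have hk : k < s.length - 1 := by omega
    simp only [List.getElem_map, PySem.List.getElem_pyRange_one, legs, List.getElem_zip,
      List.getElem_tail]
    have e0 : (0 : Int) + (k : Int) = ((k : Nat) : Int) := by omega
    have e1 : ((k : Nat) : Int) + 1 = (((k + 1 : Nat)) : Int) := by push_cast; ring
    rw [e0, e1, PySem.List.pyGetD_natCast, PySem.List.pyGetD_natCast,
      List.getD_eq_getElem s 0 (by omega), List.getD_eq_getElem s 0 (by omega)]

theorem A_eq (n : Int) (s : List Int) :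
    getMostVisited n s
      = (let maxVal := (PySem.List.max? (itemsOf s) (fun x => x.2)).getD (0, 0)
         ((itemsOf s).foldl
           (fun (mv : Option Int) kv =>
             if kv.2 == maxVal.2 && mv.all (fun m => kv.1 < m) then some kv.1 else mv)
           (none : Option Int)).getD 0) := by
  have hbody : (fun (dk : Std.HashMap Int Int × List Int) (i : Int) =>
      let si := PySem.List.pyGetD s i 0
      let si1 := PySem.List.pyGetD s (i + 1) 0
      let ff : Bool × Int := if si1 < si then (true, si1 - 1) else (false, si1 + 1)
      walkA (ff.2 - si).natAbs si ff.2 ff.1 dk.1 dk.2)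
      = (fun (dk : Std.HashMap Int Int × List Int) (i : Int) =>
          stepA dk (PySem.List.pyGetD s i 0) (PySem.List.pyGetD s (i + 1) 0)) := rfl
  unfold getMostVisited
  rw [hbody, ← List.foldl_map
    (f := fun i : Int => (PySem.List.pyGetD s i 0, PySem.List.pyGetD s (i + 1) 0))
    (g := fun (dk : Std.HashMap Int Int × List Int) (pr : Int × Int) => stepA dk pr.1 pr.2),
    mapIdx_eq_zip s]
  rfl

theorem scanMin_none (V : Int) : ∀ (l : List (Int × Int)) (mv : Option Int),
    l.foldl (fun mv kv => if kv.2 == V && mv.all (fun m => kv.1 < m) then some kv.1 else mv) mv = none →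
      (mv = none ∧ ∀ kv ∈ l, kv.2 ≠ V) := by
  intro l
  induction l with
  | nil => intro mv h; exact ⟨h, by simp⟩
  | cons kv t ih =>
    intro mv h
    obtain ⟨hstep, ht⟩ := ih _ h
    beta_reduce at hstep
    by_cases hc : (kv.2 == V && mv.all (fun m => kv.1 < m)) = true
    · rw [if_pos hc] at hstep; exact absurd hstep (by simp)
    · rw [if_neg hc] at hstep
      subst hstep
      simp only [Option.all_none, Bool.and_true] at hc
      refine ⟨rfl, ?_⟩
      intro kv' hkv'
      rcases List.mem_cons.mp hkv' with rfl | hmem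
      · simpa using hc
      · exact ht kv' hmem

theorem scanMin (V : Int) : ∀ (l : List (Int × Int)) (mv : Option Int) (x : Int),
    l.foldl (fun mv kv => if kv.2 == V && mv.all (fun m => kv.1 < m) then some kv.1 else mv) mv = some x →
      ((mv = some x ∨ (x, V) ∈ l) ∧ (∀ kv ∈ l, kv.2 = V → x ≤ kv.1) ∧
        (∀ m, mv = some m → x ≤ m)) := by
  intro l
  induction l with
  | nil =>
    intro mv x h
    exact ⟨Or.inl h, by simp, fun m hm => by rw [hm] at h; exact le_of_eq (Option.some.inj h).symm⟩
  | cons kv t ih =>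
    intro mv x h
    simp only [List.foldl_cons] at h
    obtain ⟨h1, h2, h3⟩ := ih _ x h
    have hstep3 : ∀ m, (if kv.2 == V && mv.all (fun m => kv.1 < m) then some kv.1 else mv) = some m → x ≤ m := h3
    by_cases hc : (kv.2 == V && mv.all (fun m => kv.1 < m)) = true
    · -- step assigned some kv.1
      have hkvV : kv.2 = V := by
        have := (Bool.and_elim_left hc); exact beq_iff_eq.mp this
      have hxkv : x ≤ kv.1 := hstep3 kv.1 (by rw [if_pos hc])
      refine ⟨?_, ?_, ?_⟩
      · rcases h1 with hs | hmem
        · rw [if_pos hc] at hs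
          have hkvx : kv = (x, V) := Prod.ext (Option.some.inj hs) hkvV
          right
          rw [← hkvx]
          exact List.mem_cons_self
        · right; exact List.mem_cons_of_mem _ hmem
      · intro kv' hkv' hV
        rcases List.mem_cons.mp hkv' with rfl | hmem
        · exact hxkv
        · exact h2 kv' hmem hV
      · intro m hm
        subst hm
        have hlt : kv.1 < m := by
          have := Bool.and_elim_right hc
          simpa using this
        omega
    · -- step kept mv
      have hkeep : (if kv.2 == V && mv.all (fun m => kv.1 < m) then some kv.1 else mv) = mv :=
        if_neg hc
      rw [hkeep] at h1 h3
      refine ⟨?_, ?_, h3⟩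
      · rcases h1 with hs | hmem
        · exact Or.inl hs
        · right; exact List.mem_cons_of_mem _ hmem
      · intro kv' hkv' hV
        rcases List.mem_cons.mp hkv' with rfl | hmem
        · -- kv'.2 = V but cond failed: mv = some m with m ≤ kv'.1
          rcases hmv : mv with _ | m
          · exfalso
            rw [hmv] at hc
            simp [hV] at hc
          · have hle : m ≤ kv'.1 := by
              rw [hmv] at hc
              by_contra hcon
              exact hc (by simp [hV, lt_of_not_ge hcon])
            have := h3 m hmv
            omega
        · exact h2 kv' hmem hV

theorem A_best (n : Int) (s : List Int) (h : 2 ≤ s.length) : IsBest s (getMostVisited n s) := by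
  rw [A_eq]
  have hlegs : 0 < (legs s).length := by
    simp only [legs, List.length_zip, List.length_tail]; omega
  obtain ⟨pr0, hpr0⟩ := List.exists_mem_of_length_pos hlegs
  have hcnt0 : 1 ≤ cnt s (min pr0.1 pr0.2) := by
    unfold cnt
    rw [Nat.one_le_iff_ne_zero, ← Nat.pos_iff_ne_zero, List.countP_pos_iff]
    exact ⟨pr0, hpr0, by simp⟩
  have hne : itemsOf s ≠ [] := by
    intro hnil
    have := memI2 s _ hcnt0
    rw [hnil] at this
    exact absurd this (List.not_mem_nil)
  obtain ⟨mx, hmx⟩ : ∃ mx, PySem.List.max? (itemsOf s) (fun x => x.2) = some mx := by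
    rcases hm : PySem.List.max? (itemsOf s) (fun x => x.2) with _ | mx
    · exact absurd ((PySem.List.max?_eq_none_iff _ _).mp hm) hne
    · exact ⟨mx, rfl⟩
  have hmxmem := PySem.List.max?_mem hmx
  have hmxub := PySem.List.max?_isMax hmx
  obtain ⟨hmxV, hmxpos⟩ := memI s mx hmxmem
  simp only [hmx, Option.getD_some]
  rcases hres : (itemsOf s).foldl
      (fun (mv : Option Int) kv =>
        if kv.2 == mx.2 && mv.all (fun m => kv.1 < m) then some kv.1 else mv)
      (none : Option Int) with _ | x
  · exfalso
    obtain ⟨_, hall⟩ := scanMin_none mx.2 _ _ hres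
    exact hall mx hmxmem rfl
  · obtain ⟨h1, h2, _⟩ := scanMin mx.2 _ _ x hres
    have hxmem : (x, mx.2) ∈ itemsOf s := by
      rcases h1 with hcon | hmem
      · exact absurd hcon (by simp)
      · exact hmem
    obtain ⟨hxV, hxpos⟩ := memI s (x, mx.2) hxmem
    simp only at hxV hxpos
    rw [hres, Option.getD_some]
    refine ⟨hxpos, ?_, ?_⟩
    · intro q hq
      have := hmxub _ (memI2 s q hq)
      simp only at this
      omega
    · intro q hq hEq
      have hqmem := memI2 s q hq
      have : x ≤ q := h2 (q, (cnt s q : Int)) hqmem (by simp; omega)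
      exact this

-- ---- B-side: the endpoint scan picks the smallest argmax among lower endpoints ----

def stepB (f : Int → Int) (best : Option Int × Int) (lo : Int) : Option Int × Int :=
  if best.2 < f lo then (some lo, f lo) else best

def runMax (f : Int → Int) (bc : Int) (l : List Int) : Int :=
  l.foldl (fun a x => max a (f x)) bc

def losOf (s : List Int) : List Int :=
  PySem.List.sorted (PySem.Set.ofList ((legs s).map (fun pr => min pr.1 pr.2))) (fun x => x) false

theorem alt_eq (n : Int) (s : List Int) :
    getMostVisited_alt n s
      = ((losOf s).foldl (stepB (fun lo => (cnt s lo : Int))) (none, 0)).1.getD 0 := by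
  have e1 : ((fun (q : Int × Int) => q.1) ∘
      (fun (p : Int × Int) => if p.1 ≤ p.2 then (p.1, p.2) else (p.2, p.1)))
      = (fun pr : Int × Int => min pr.1 pr.2) := by
    funext pr; by_cases h : pr.1 ≤ pr.2 <;> simp [h, min_def]
  have e2 : ∀ lo : Int, ((fun (t : Int × Int) => decide (t.1 ≤ lo ∧ lo ≤ t.2)) ∘
      (fun (p : Int × Int) => if p.1 ≤ p.2 then (p.1, p.2) else (p.2, p.1)))
      = (fun pr : Int × Int => decide (min pr.1 pr.2 ≤ lo ∧ lo ≤ max pr.1 pr.2)) := by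
    intro lo; funext pr; by_cases h : pr.1 ≤ pr.2 <;> simp [h, min_def, max_def]
  have e3 : (fun (best : Option Int × Int) (lo : Int) =>
        let c : Int := ((s.zip s.tail).map
          (fun p => if p.1 ≤ p.2 then (p.1, p.2) else (p.2, p.1))).countP
            (fun t => decide (t.1 ≤ lo ∧ lo ≤ t.2))
        if best.2 < c then (some lo, c) else best)
      = stepB (fun lo => (cnt s lo : Int)) := by
    funext best lo
    simp only [stepB, cnt, legs, List.countP_map, e2 lo]
  unfold getMostVisited_alt losOf
  simp only [PySem.List.slice_from_one, List.map_map, e1, legs, e3]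

theorem scan_noImp (f : Int → Int) : ∀ (l : List Int) (st : Option Int × Int),
    (∀ x ∈ l, f x ≤ st.2) → List.foldl (stepB f) st l = st := by
  intro l
  induction l with
  | nil => intro st _; rfl
  | cons x t ih =>
    intro st h
    simp only [List.foldl_cons, stepB]
    have hx : f x ≤ st.2 := h x (List.mem_cons_self)
    rw [if_neg (not_lt.mpr hx)]
    exact ih st (fun y hy => h y (List.mem_cons_of_mem _ hy))

theorem scanB (f : Int → Int) : ∀ (l : List Int) (mv : Option Int) (bc : Int),
    l.Pairwise (· < ·) → bc < runMax f bc l →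
    ∃ x0 ∈ l, f x0 = runMax f bc l ∧ (List.foldl (stepB f) (mv, bc) l).1 = some x0 ∧
      ∀ y ∈ l, y < x0 → f y < runMax f bc l := by
  intro l
  induction l with
  | nil => intro mv bc _ himp; simp [runMax] at himp
  | cons x t ih =>
    intro mv bc hpw himp
    obtain ⟨hx, ht⟩ := List.pairwise_cons.mp hpw
    have hstep : runMax f bc (x :: t) = runMax f (max bc (f x)) t := rfl
    by_cases hbx : bc < f x
    · have hmax : max bc (f x) = f x := max_eq_right (le_of_lt hbx)
      have hM : runMax f bc (x :: t) = runMax f (f x) t := by rw [hstep, hmax]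
      have hfold : List.foldl (stepB f) (mv, bc) (x :: t)
          = List.foldl (stepB f) (some x, f x) t := by
        simp only [List.foldl_cons, stepB, if_pos hbx]
      by_cases himp2 : f x < runMax f (f x) t
      · obtain ⟨x0, hx0t, hfx0, hfst, hmin⟩ := ih (some x) (f x) ht himp2
        refine ⟨x0, List.mem_cons_of_mem _ hx0t, by rw [hM]; exact hfx0, by rw [hfold]; exact hfst, ?_⟩
        intro y hy hylt
        rcases List.mem_cons.mp hy with rfl | hyt
        · rw [hM]; exact himp2
        · rw [hM]; exact hmin y hyt hylt
      · have hge : runMax f (f x) t ≤ f x := le_of_not_gt himp2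
        have hle : f x ≤ runMax f (f x) t := (PySem.List.le_foldl_max_int t f (f x)).1
        have hfx : f x = runMax f (f x) t := le_antisymm hle hge
        have hall : ∀ y ∈ t, f y ≤ f x := by
          intro y hy; rw [hfx]; exact (PySem.List.le_foldl_max_int t f (f x)).2 y hy
        refine ⟨x, List.mem_cons_self, by rw [hM]; exact hfx, ?_, ?_⟩
        · rw [hfold, scan_noImp f t (some x, f x) hall]
        · intro y hy hylt
          rcases List.mem_cons.mp hy with rfl | hyt
          · exact absurd hylt (lt_irrefl _)
          · exact absurd hylt (not_lt.mpr (le_of_lt (hx y hyt)))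
    · have hmax : max bc (f x) = bc := max_eq_left (le_of_not_gt hbx)
      have hM : runMax f bc (x :: t) = runMax f bc t := by rw [hstep, hmax]
      have hfold : List.foldl (stepB f) (mv, bc) (x :: t)
          = List.foldl (stepB f) (mv, bc) t := by
        simp only [List.foldl_cons, stepB, if_neg hbx]
      rw [hM] at himp ⊢
      obtain ⟨x0, hx0t, hfx0, hfst, hmin⟩ := ih mv bc ht himp
      refine ⟨x0, List.mem_cons_of_mem _ hx0t, hfx0, by rw [hfold]; exact hfst, ?_⟩
      intro y hy hylt
      rcases List.mem_cons.mp hy with rfl | hyt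
      · exact lt_of_le_of_lt (le_of_not_gt hbx) himp
      · exact hmin y hyt hylt

theorem mem_losOf (s : List Int) (x : Int) : x ∈ losOf s ↔ IsLo s x := by
  unfold losOf IsLo
  rw [(PySem.List.sorted_perm _ _ _).mem_iff, PySem.Set.mem_ofList]
  simp [List.mem_map, eq_comm]

theorem pairwise_losOf (s : List Int) : (losOf s).Pairwise (· < ·) := by
  have hle : (losOf s).Pairwise (fun a b => a ≤ b) := PySem.List.sorted_pairwise _ _
  have hnd : (losOf s).Nodup :=
    ((PySem.List.sorted_perm _ _ _).nodup_iff).mpr (PySem.Set.nodup_ofList _)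
  exact (hle.and hnd).imp (fun h => lt_of_le_of_ne h.1 h.2)

theorem cnt_pos_iff (s : List Int) (q : Int) :
    1 ≤ cnt s q ↔ ∃ pr ∈ legs s, min pr.1 pr.2 ≤ q ∧ q ≤ max pr.1 pr.2 := by
  unfold cnt
  rw [Nat.one_le_iff_ne_zero, ← Nat.pos_iff_ne_zero, List.countP_pos_iff]
  simp

theorem cnt_lo_pos (s : List Int) (p : Int) (h : IsLo s p) : 1 ≤ cnt s p := by
  obtain ⟨pr, hpr, hmin⟩ := h
  exact (cnt_pos_iff s p).mpr ⟨pr, hpr, le_of_eq hmin, hmin ▸ min_le_max⟩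

theorem cnt_step_down (s : List Int) (q : Int) (h : ¬ IsLo s q) :
    cnt s q ≤ cnt s (q - 1) := by
  unfold cnt
  apply List.countP_mono_left
  intro pr hpr hq
  have hne : min pr.1 pr.2 ≠ q := fun he => h ⟨pr, hpr, he⟩
  simp only [decide_eq_true_eq] at hq ⊢
  omega

theorem bridge (s : List Int) (q : Int) (hq : 1 ≤ cnt s q) :
    ∃ p, IsLo s p ∧ p ≤ q ∧ cnt s q ≤ cnt s p := by
  set glb : Int := ((legs s).map (fun pr => min pr.1 pr.2)).foldl min q with hglb
  have hglb_le : ∀ pr ∈ legs s, glb ≤ min pr.1 pr.2 := by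
    intro pr hpr
    exact (PySem.List.foldl_min_le _ q).2 _ (List.mem_map_of_mem hpr)
  have main : ∀ N : Nat, ∀ q' : Int, 1 ≤ cnt s q' → q' - glb ≤ (N : Int) →
      ∃ p, IsLo s p ∧ p ≤ q' ∧ cnt s q' ≤ cnt s p := by
    intro N
    induction N with
    | zero =>
      intro q' h1 hb
      by_cases hlo : IsLo s q'
      · exact ⟨q', hlo, le_refl _, le_refl _⟩
      · exfalso
        obtain ⟨pr, hpr, hle1, _⟩ := (cnt_pos_iff s q').mp h1
        have := hglb_le pr hpr
        have hne : min pr.1 pr.2 ≠ q' := fun he => hlo ⟨pr, hpr, he⟩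
        omega
    | succ N ih =>
      intro q' h1 hb
      by_cases hlo : IsLo s q'
      · exact ⟨q', hlo, le_refl _, le_refl _⟩
      · have h2 := cnt_step_down s q' hlo
        obtain ⟨pr, hpr, hle1, _⟩ := (cnt_pos_iff s q').mp h1
        have hg := hglb_le pr hpr
        have hne : min pr.1 pr.2 ≠ q' := fun he => hlo ⟨pr, hpr, he⟩
        obtain ⟨p, hp, hple, hcle⟩ := ih (q' - 1) (le_trans h1 h2) (by omega)
        exact ⟨p, hp, by omega, le_trans h2 hcle⟩
  have hq_glb : q - glb ≤ ((q - glb).toNat : Int) := Int.self_le_toNat _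
  exact main (q - glb).toNat q hq hq_glb

theorem B_best (n : Int) (s : List Int) (h : 2 ≤ s.length) : IsBest s (getMostVisited_alt n s) := by
  rw [alt_eq]
  set f : Int → Int := fun lo => (cnt s lo : Int) with hf
  have hlegs : 0 < (legs s).length := by
    simp only [legs, List.length_zip, List.length_tail]
    omega
  obtain ⟨pr0, hpr0⟩ := List.exists_mem_of_length_pos hlegs
  have hlo0 : IsLo s (min pr0.1 pr0.2) := ⟨pr0, hpr0, rfl⟩
  have hlo0mem : min pr0.1 pr0.2 ∈ losOf s := (mem_losOf s _).mpr hlo0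
  have h0 : (0 : Int) < runMax f 0 (losOf s) := by
    have h1 : (1 : Int) ≤ f (min pr0.1 pr0.2) := by
      simp only [hf]; exact_mod_cast cnt_lo_pos s _ hlo0
    have h2 := (PySem.List.le_foldl_max_int (losOf s) f 0).2 _ hlo0mem
    unfold runMax
    omega
  obtain ⟨x0, hx0mem, hfx0, hfst, hmin⟩ := scanB f (losOf s) none 0 (pairwise_losOf s) h0
  rw [hfst, Option.getD_some]
  have hub : ∀ p, IsLo s p → f p ≤ runMax f 0 (losOf s) := by
    intro p hp
    exact (PySem.List.le_foldl_max_int (losOf s) f 0).2 _ ((mem_losOf s p).mpr hp)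
  have hx0lo : IsLo s x0 := (mem_losOf s x0).mp hx0mem
  have hcnt_ub : ∀ q, 1 ≤ cnt s q → cnt s q ≤ cnt s x0 := by
    intro q hq
    obtain ⟨p, hp, _, hcle⟩ := bridge s q hq
    have h3 : f p ≤ f x0 := by rw [hfx0]; exact hub p hp
    simp only [hf] at h3
    omega
  refine ⟨cnt_lo_pos s x0 hx0lo, hcnt_ub, ?_⟩
  intro q hq hEq
  obtain ⟨p, hp, hple, hcle⟩ := bridge s q hq
  have hple2 : cnt s p ≤ cnt s x0 := hcnt_ub p (cnt_lo_pos s p hp)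
  have hfp : f p = runMax f 0 (losOf s) := by
    rw [← hfx0]; simp only [hf]; congr 1; omega
  have hx0p : x0 ≤ p := by
    by_contra hcon
    have := hmin p ((mem_losOf s p).mpr hp) (lt_of_not_ge hcon)
    omega
  omega

-- ===== VERDICT (by name: the statement is the Claim_ definition above) =====
theorem getMostVisited_spec : Claim_equal_getMostVisited := by
  intro n s _ hpre
  unfold Spec_getMostVisited
  exact best_unique (A_best n s hpre) (B_best n s hpre)
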